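-- pv_equiv track=rewrite | github.com/theandrew168/advent-of-code | 2025/day10/main.py | press1
-- ===== SOURCE A (Python) =====
-- def press1(lights, button):
--     s = ''
--     for i, c in enumerate(lights):
--         if i in button:
--             if c == '.':
--                 s += '#'
--             else:
--                 s += '.'
--         else:
--             s += c
--     return s
-- ===== SOURCE B (Python) =====
-- def press1(lights, button):
--     chars = list(lights)
--     for i in set(button):
--         if 0 <= i < len(chars):
--             chars[i] = '#' if chars[i] == '.' else '.'
--     return ''.join(chars)
-- ===== Notes on version B (the rewrite author's own statement) =====
-- stated objective: alternative
-- what changed: Instead of scanning every character and membership-testing its index against the button list, B mutates a char list in place by iterating over the distinct button indices (skipping out-of-range ones) and joins at the end.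
import Mathlib
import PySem

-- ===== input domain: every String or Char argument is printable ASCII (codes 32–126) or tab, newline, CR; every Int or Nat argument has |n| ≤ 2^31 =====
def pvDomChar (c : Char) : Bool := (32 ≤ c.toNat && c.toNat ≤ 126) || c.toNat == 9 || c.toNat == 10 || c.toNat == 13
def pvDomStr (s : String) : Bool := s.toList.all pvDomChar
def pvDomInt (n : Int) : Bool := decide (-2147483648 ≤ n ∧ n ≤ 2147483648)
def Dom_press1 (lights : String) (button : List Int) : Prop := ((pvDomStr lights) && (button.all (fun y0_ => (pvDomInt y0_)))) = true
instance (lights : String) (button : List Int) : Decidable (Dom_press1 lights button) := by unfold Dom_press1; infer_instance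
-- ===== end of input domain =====

-- B toggles a char list in place over the distinct button indices instead of membership-testing every position (alternative traversal of the data).

-- ===== PORT A =====
def press1 (lights : String) (button : List Int) : String :=
  String.ofList ((PySem.List.enumerate lights.toList 0).foldl
    (fun s (p : Int × Char) =>
      if p.1 ∈ button then
        if p.2 = '.' then s ++ ['#'] else s ++ ['.']
      else s ++ [p.2]) [])

-- ===== PORT B =====
-- one iteration of B's loop body: guard 0 <= i < len(chars), then toggle chars[i]
def press1AltStep (cs : List Char) (i : Int) : List Char :=
  if 0 ≤ i ∧ i < (cs.length : Int) then
    cs.set i.toNat (if cs.getD i.toNat ' ' = '.' then '#' else '.')  -- getD is exact: the guard keeps the index in range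
  else cs

def press1_alt (lights : String) (button : List Int) : String :=
  String.ofList ((PySem.Set.ofList button).foldl press1AltStep lights.toList)

-- ===== PRECONDITION & SPEC =====
def Spec_press1 (lights : String) (button : List Int) (out : String) : Prop := out = press1_alt lights button
instance (lights : String) (button : List Int) (out : String) : Decidable (Spec_press1 lights button out) := by unfold Spec_press1; infer_instance

-- ===== CLAIM (what is proved, stated in full; the proofs are below) =====
def Claim_equal_press1 : Prop := ∀ (lights : String) (button : List Int), Dom_press1 lights button → Spec_press1 lights button (press1 lights button)

-- ===== LEMMAS AND PROOFS =====

theorem foldl_app_map (button : List Int) :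
    ∀ (l : List (Int × Char)) (acc : List Char),
      l.foldl (fun s p =>
        if p.1 ∈ button then
          if p.2 = '.' then s ++ ['#'] else s ++ ['.']
        else s ++ [p.2]) acc
      = acc ++ l.map (fun p => if p.1 ∈ button then (if p.2 = '.' then '#' else '.') else p.2) := by
  intro l
  induction l with
  | nil => simp
  | cons p t ih =>
    intro acc
    simp only [List.foldl, List.map]
    by_cases h1 : p.1 ∈ button <;> by_cases h2 : p.2 = '.' <;> simp [h1, h2, ih]

theorem pressA_as_map (lights : String) (button : List Int) :
    press1 lights button =
      String.ofList ((PySem.List.enumerate lights.toList 0).map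
        (fun p => if p.1 ∈ button then (if p.2 = '.' then '#' else '.') else p.2)) := by
  unfold press1
  congr 1
  simpa using foldl_app_map button (PySem.List.enumerate lights.toList 0) []

theorem stepLen (cs : List Char) (i : Int) : (press1AltStep cs i).length = cs.length := by
  unfold press1AltStep; split <;> simp

theorem foldLen (l : List Int) : ∀ (cs : List Char),
    (l.foldl press1AltStep cs).length = cs.length := by
  induction l with
  | nil => intro cs; rfl
  | cons i t ih => intro cs; simp [List.foldl, ih, stepLen]

theorem foldGet (l : List Int) (hnd : l.Nodup) :
    ∀ (cs : List Char) (k : Nat) (hk : k < cs.length),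
      (l.foldl press1AltStep cs)[k]'(by rw [foldLen]; exact hk) =
        if (k : Int) ∈ l then (if cs[k] = '.' then '#' else '.') else cs[k] := by
  induction l with
  | nil => intro cs k hk; simp
  | cons i t ih =>
    intro cs k hk
    simp only [List.foldl]
    have hnd' : t.Nodup := hnd.of_cons
    have hk' : k < (press1AltStep cs i).length := by rw [stepLen]; exact hk
    rw [ih hnd' (press1AltStep cs i) k hk']
    by_cases hik : (k : Int) = i
    · -- this position is set now; k ∉ t by Nodup
      have hknt : (k : Int) ∉ t := by
        rw [hik]; exact (List.nodup_cons.mp hnd).1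
      have hrange : 0 ≤ i ∧ i < (cs.length : Int) := by
        constructor
        · rw [← hik]; exact Int.natCast_nonneg k
        · rw [← hik]; exact_mod_cast hk
      have hiToNat : i.toNat = k := by omega
      have hstep : (press1AltStep cs i)[k]'hk' = (if cs[k] = '.' then '#' else '.') := by
        unfold press1AltStep
        simp [hrange, hiToNat, List.getElem_set_self, hk]
      rw [hstep]
      simp [← hik, hknt]
    · -- position k untouched by this step
      have hstep : (press1AltStep cs i)[k]'hk' = cs[k] := by
        unfold press1AltStep
        split
        · next hr =>
          apply List.getElem_set_ne
          omega
        · rfl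
      rw [hstep]
      have : ((k : Int) ∈ i :: t) ↔ ((k : Int) ∈ t) := by
        simp [List.mem_cons, hik]
      by_cases hkt : (k : Int) ∈ t <;> simp [hkt, hik]

theorem press1_eq (lights : String) (button : List Int) :
    press1 lights button = press1_alt lights button := by
  rw [pressA_as_map]
  unfold press1_alt
  congr 1
  apply List.ext_getElem
  · rw [foldLen]; simp [PySem.List.length_enumerate]
  · intro k h1 h2
    have hk : k < lights.toList.length := by
      simpa [PySem.List.length_enumerate] using h1
    rw [foldGet (PySem.Set.ofList button) (PySem.Set.nodup_ofList button) lights.toList k hk]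
    rw [List.getElem_map, PySem.List.getElem_enumerate]
    simp [PySem.Set.mem_ofList]

-- ===== VERDICT (by name: the statement is the Claim_ definition above) =====
theorem press1_spec : Claim_equal_press1 := by
  intro lights button _
  unfold Spec_press1
  exact press1_eq lights button
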